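-- pv_equiv track=rewrite | github.com/syurskyi/Python_Topics | 125_algorithms/_examples/_algorithms_challenges/pybites/beginner/beginner-bite-77-new-places-to-travel-to.py | uncommon_cities_solution_2
-- ===== SOURCE A (Python) =====
-- def uncommon_cities_solution_2(my_cities, other_cities):
--     uncommon = []
--     for item in my_cities:
--         if item not in other_cities:
--             uncommon.append(item)
--     for item in other_cities:
--         if item not in my_cities:
--             uncommon.append(item)
--     return len(uncommon)
-- ===== SOURCE B (Python) =====
-- def uncommon_cities_solution_2(my_cities, other_cities):
--     mc = {}
--     for c in my_cities:
--         mc[c] = mc.get(c, 0) + 1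
--     oc = {}
--     for c in other_cities:
--         oc[c] = oc.get(c, 0) + 1
--     total = 0
--     for k, v in mc.items():
--         if k not in oc:
--             total += v
--     for k, v in oc.items():
--         if k not in mc:
--             total += v
--     return total
-- ===== Notes on version B (the rewrite author's own statement) =====
-- stated objective: faster
-- what changed: Replaces the per-element linear membership scans over the opposite list with two frequency dicts built once, then sums the counts of keys absent from the other dict.
import Mathlib
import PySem

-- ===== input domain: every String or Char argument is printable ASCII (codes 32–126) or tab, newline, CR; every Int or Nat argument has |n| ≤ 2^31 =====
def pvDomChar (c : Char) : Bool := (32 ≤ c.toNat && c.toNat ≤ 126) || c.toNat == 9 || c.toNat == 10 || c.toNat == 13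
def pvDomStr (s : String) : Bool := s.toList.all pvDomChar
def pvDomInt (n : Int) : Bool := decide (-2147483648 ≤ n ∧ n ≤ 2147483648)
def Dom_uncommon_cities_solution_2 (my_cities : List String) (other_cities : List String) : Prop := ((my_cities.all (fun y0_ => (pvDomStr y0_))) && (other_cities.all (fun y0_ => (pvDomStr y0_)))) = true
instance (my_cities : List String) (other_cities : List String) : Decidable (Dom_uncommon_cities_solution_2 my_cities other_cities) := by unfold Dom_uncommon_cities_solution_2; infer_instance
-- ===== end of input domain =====

-- B builds two frequency dicts once and sums counts of keys absent from the other dict,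
-- replacing A's per-element membership scans (objective: faster).


-- ===== PORT A =====
def uncommon_cities_solution_2 (my_cities : List String) (other_cities : List String) : Int :=
  let uncommon : List String := my_cities.foldl
    (fun acc item => if !(other_cities.contains item) then acc ++ [item] else acc) []
  let uncommon := other_cities.foldl
    (fun acc item => if !(my_cities.contains item) then acc ++ [item] else acc) uncommon
  (uncommon.length : Int)

-- ===== PORT B =====
def uncommon_cities_solution_2_alt (my_cities : List String) (other_cities : List String) : Int :=
  let mc : PySem.Dict String Int :=
    my_cities.foldl (fun d c => d.insert c (d.getD c 0 + 1)) PySem.Dict.empty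
  let oc : PySem.Dict String Int :=
    other_cities.foldl (fun d c => d.insert c (d.getD c 0 + 1)) PySem.Dict.empty
  let total : Int := mc.items.foldl
    (fun t kv => if !(oc.contains kv.1) then t + kv.2 else t) 0
  oc.items.foldl (fun t kv => if !(mc.contains kv.1) then t + kv.2 else t) total

-- ===== PRECONDITION & SPEC =====
def Spec_uncommon_cities_solution_2 (my_cities : List String) (other_cities : List String) (out : Int) : Prop := out = uncommon_cities_solution_2_alt my_cities other_cities
instance (my_cities : List String) (other_cities : List String) (out : Int) : Decidable (Spec_uncommon_cities_solution_2 my_cities other_cities out) := by unfold Spec_uncommon_cities_solution_2; infer_instance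

-- ===== CLAIM (what is proved, stated in full; the proofs are below) =====
def Claim_equal_uncommon_cities_solution_2 : Prop := ∀ (my_cities : List String) (other_cities : List String), Dom_uncommon_cities_solution_2 my_cities other_cities → Spec_uncommon_cities_solution_2 my_cities other_cities (uncommon_cities_solution_2 my_cities other_cities)

-- ===== LEMMAS AND PROOFS =====

-- summing (if q k then xs.count k else 0) over a nodup key list covering xs counts xs.filter q
theorem pv_sum_counts (q : String → Bool) :
    ∀ (K : List String), K.Nodup → ∀ (xs : List String), (∀ x ∈ xs, x ∈ K) →
    (K.map (fun k => if q k then (xs.count k : Int) else 0)).sum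
      = ((xs.filter q).length : Int) := by
  intro K
  induction K with
  | nil =>
    intro _ xs hmem
    have : xs = [] := List.eq_nil_iff_forall_not_mem.mpr (fun x hx => by simpa using hmem x hx)
    simp [this]
  | cons k K' ih =>
    intro hnd xs hmem
    have hndK' : K'.Nodup := (List.nodup_cons.mp hnd).2
    have hknot : k ∉ K' := (List.nodup_cons.mp hnd).1
    set xs' := xs.filter (fun x => !(x == k)) with hxs'
    have hmem' : ∀ x ∈ xs', x ∈ K' := by
      intro x hx
      have hx' := List.mem_filter.mp hx
      have hne : x ≠ k := by simpa using hx'.2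
      rcases List.mem_cons.mp (hmem x hx'.1) with h | h
      · exact absurd h hne
      · exact h
    have hih := ih hndK' xs' hmem'
    have hcong : K'.map (fun k' => if q k' then (xs.count k' : Int) else 0)
        = K'.map (fun k' => if q k' then (xs'.count k' : Int) else 0) := by
      apply List.map_congr_left
      intro k' hk'
      have hne : k' ≠ k := fun h => hknot (h ▸ hk')
      have : xs'.count k' = xs.count k' := by
        rw [hxs', List.count_filter]
        simp [hne]
      rw [this]
    have hcount : (xs.filter q).count k = if q k then xs.count k else 0 := by
      by_cases hq : q k = true
      · rw [List.count_filter hq]; simp [hq]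
      · have hk : k ∉ xs.filter q := fun hm => hq ((List.mem_filter.mp hm).2)
        simp [List.count_eq_zero.mpr hk, hq]
    have hlen : (xs.filter q).length = (xs.filter q).count k + (xs'.filter q).length := by
      have hcomm : xs'.filter q = (xs.filter q).filter (fun x => !(x == k)) := by
        rw [hxs', List.filter_filter, List.filter_filter]
        apply List.filter_congr
        intro x _
        exact Bool.and_comm _ _
      rw [hcomm, List.count, ← List.countP_eq_length_filter, ← List.countP_eq_length_filter]
      have h2 := List.length_eq_countP_add_countP (p := fun x => x == k) (l := xs.filter q)
      rw [← List.countP_eq_length_filter] at h2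
      simp only [decide_not, Bool.decide_eq_true] at h2 ⊢
      omega
    rw [List.map_cons, List.sum_cons, hcong, hih, hlen, hcount]
    by_cases hq : q k = true <;> simp [hq]

-- B's key-loop over a counter equals the filtered length
theorem pv_loop_counter (xs ys : List String) (t0 : Int) :
    (PySem.Dict.counter xs).items.foldl
      (fun t kv => if !(ys.contains kv.1) then t + kv.2 else t) t0
      = t0 + ((xs.filter (fun x => !(ys.contains x))).length : Int) := by
  rw [PySem.Dict.items_counter, List.foldl_map]
  have hfun : (fun (t : Int) (k : String) =>
      if !(ys.contains k) then t + (xs.count k : Int) else t)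
      = fun t k => t + (if !(ys.contains k) then (xs.count k : Int) else 0) := by
    funext t k; by_cases h : k ∈ ys <;> simp [h]
  rw [hfun, PySem.List.foldl_add]
  congr 1
  exact pv_sum_counts (fun x => !(ys.contains x)) (PySem.Set.ofList xs)
    (PySem.Set.nodup_ofList xs) xs (fun x hx => (PySem.Set.mem_ofList xs x).mpr hx)

-- ===== VERDICT (by name: the statement is the Claim_ definition above) =====
theorem uncommon_cities_solution_2_spec : Claim_equal_uncommon_cities_solution_2 := by
  intro my other _
  unfold Spec_uncommon_cities_solution_2
  dsimp only [uncommon_cities_solution_2, uncommon_cities_solution_2_alt]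
  rw [PySem.List.foldl_append_if_eq_filter, PySem.List.foldl_append_if_eq_filter]
  rw [PySem.Dict.foldl_insert_getD_add_one_eq_counter,
      PySem.Dict.foldl_insert_getD_add_one_eq_counter]
  simp only [PySem.Dict.contains_counter]
  rw [pv_loop_counter, pv_loop_counter]
  simp [List.length_append]
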